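-- pv_equiv track=rewrite | github.com/Magenta195/programmers | LV4/행렬과 연산.py | solution
-- ===== SOURCE A (Python) =====
-- from collections import deque
--
-- def shift_rows(left_rc, right_rc, center_rc):
--     left_rc.rotate()
--     right_rc.rotate()
--     center_rc.rotate()
--     return left_rc, right_rc, center_rc
--
-- def rotates(left_rc, right_rc, center_rc=None):
--     if center_rc == None :
--         right_rc.appendleft(left_rc.popleft())
--         left_rc.append(right_rc.pop())
--         return left_rc, right_rc
--
--     right_rc.appendleft(center_rc[0].pop())
--     center_rc[-1].append(right_rc.pop())
--     left_rc.append(center_rc[-1].popleft())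
--     center_rc[0].appendleft(left_rc.popleft())
--
--     return left_rc, right_rc, center_rc
--
-- def solution(rc, operations):
--     col_length, row_length = len(rc), len(rc[0])
--     left_rc = deque([rc[i][0] for i in range(col_length)])
--     right_rc = deque([rc[i][-1] for i in range(col_length)])
--     center_rc = deque([deque(rc[i][1:-1]) for i in range(col_length)])
--     for ops in operations :
--         if ops == "ShiftRow" :
--             left_rc, right_rc, center_rc = shift_rows(left_rc, right_rc, center_rc)
--         else :
--             if row_length < 3 :
--                 left_rc, right_rc = rotates(left_rc, right_rc)
--             else :
--                 left_rc, right_rc, center_rc = rotates(left_rc, right_rc, center_rc)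
--
--     new_rc = [[left_rc[i]] + list(center_rc[i]) + [right_rc[i]] for i in range(col_length)]
--
--     return new_rc
-- ===== SOURCE B (Python) =====
-- def _rotate_ring(mat):
--     n, w = len(mat), len(mat[0])
--     if n == 1:
--         row = mat[0]
--         return [[row[-1]] + row[:-1]] if w > 1 else [row]
--     if w == 1:
--         return [mat[-1]] + mat[:-1]
--     new_top = [mat[1][0]] + mat[0][:-1]
--     new_bot = mat[-1][1:] + [mat[-2][-1]]
--     new_mid = [[d[0]] + c[1:-1] + [u[-1]]
--                for c, d, u in zip(mat[1:-1], mat[2:], mat[:-2])]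
--     return [new_top] + new_mid + [new_bot]
--
-- def solution(rc, operations):
--     mat = [list(row) for row in rc]
--     for op in operations:
--         if op == "ShiftRow":
--             mat = [mat[-1]] + mat[:-1]
--         else:
--             mat = _rotate_ring(mat)
--     return mat
-- ===== Notes on version B (the rewrite author's own statement) =====
-- stated objective: alternative
-- what changed: B keeps the whole matrix as a list of rows and recomputes the shifted rows / rotated border ring per operation via per-row slicing, instead of A's three mutable deques (left column, right column, centre rows) reassembled at the end.
-- intended difference: On matrices with a degenerate border — a single column, or a single row of width >= 3 with at least one rotate operation — A's deque shuffling returns accidental values (a single-column input even comes back with every row doubled, e.g. [[5]] with ['Rotate'] gives [[5,5]]), while B returns the intended cyclic rotation of the degenerate ring ([[5]]). — e.g. on solution([[5]], ["Rotate"]): A returns [[5, 5]], B returns [[5]]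
-- outside the precondition, e.g. on solution([[1, 2], [3]], []): A returns [[1, 2], [3, 3]], B returns [[1, 2], [3]]; on solution([], []): A raises IndexError, B returns []
import Mathlib
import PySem

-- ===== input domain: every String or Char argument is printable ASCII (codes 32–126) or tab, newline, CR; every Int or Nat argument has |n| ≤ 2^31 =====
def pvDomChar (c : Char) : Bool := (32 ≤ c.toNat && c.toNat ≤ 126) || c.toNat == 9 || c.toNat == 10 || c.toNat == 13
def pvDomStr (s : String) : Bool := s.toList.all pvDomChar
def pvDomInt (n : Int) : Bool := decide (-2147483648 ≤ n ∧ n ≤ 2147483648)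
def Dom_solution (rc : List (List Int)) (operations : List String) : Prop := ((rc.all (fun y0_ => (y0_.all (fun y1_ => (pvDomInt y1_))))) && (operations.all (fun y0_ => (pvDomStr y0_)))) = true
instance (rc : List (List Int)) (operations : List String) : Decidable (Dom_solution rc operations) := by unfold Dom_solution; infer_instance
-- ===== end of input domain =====

-- B keeps the whole matrix as a list of rows and rewrites the border ring per Rotate,
-- instead of A's three mutable deques (left column, right column, centre rows): an
-- alternative data-structure formulation, not claimed faster.

-- ===== PORT A =====
-- deque.rotate(): move the last element to the front (no-op on an empty deque)
def pyRotate1 {α : Type} (xs : List α) : List α :=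
  match xs.getLast? with
  | none => xs
  | some x => x :: xs.dropLast

-- shift_rows: rotate all three deques
def shiftRowsA (l r : List Int) (c : List (List Int)) :
    List Int × List Int × List (List Int) :=
  (pyRotate1 l, pyRotate1 r, pyRotate1 c)

-- rotates(left, right) with no centre: the deque moves in Python's order; popleft/pop
-- on an empty deque would raise in Python (rc = [] is excluded by Pre_), here it defaults
def rotatesNC (l r : List Int) : List Int × List Int :=
  let x := l.headD 0                         -- left_rc.popleft()
  let l := l.tail
  let r := x :: r                            -- right_rc.appendleft(x)
  let y := r.getLastD 0                      -- right_rc.pop()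
  let r := r.dropLast
  let l := l ++ [y]                          -- left_rc.append(y)
  (l, r)

-- rotates(left, right, center): the four in-place deque moves in Python's order;
-- center[0] / center[-1] are re-read after every update (Python's aliasing when n = 1)
def rotatesC (l r : List Int) (c : List (List Int)) :
    List Int × List Int × List (List Int) :=
  let c0 := c.headD []
  let x := c0.getLastD 0                     -- center_rc[0].pop()
  let c := c.set 0 c0.dropLast
  let r := x :: r                            -- right_rc.appendleft(x)
  let y := r.getLastD 0                      -- right_rc.pop()
  let r := r.dropLast
  let cl := c.getLastD []
  let c := c.set (c.length - 1) (cl ++ [y])  -- center_rc[-1].append(y)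
  let cl2 := c.getLastD []
  let z := cl2.headD 0                       -- center_rc[-1].popleft()
  let c := c.set (c.length - 1) cl2.tail
  let l := l ++ [z]                          -- left_rc.append(z)
  let q := l.headD 0                         -- left_rc.popleft()
  let l := l.tail
  let c0b := c.headD []
  let c := c.set 0 (q :: c0b)                -- center_rc[0].appendleft(q)
  (l, r, c)

-- the body of A's loop over operations
def stepA (rowLength : Nat) (st : List Int × List Int × List (List Int)) (ops : String) :
    List Int × List Int × List (List Int) :=
  if ops == "ShiftRow" then shiftRowsA st.1 st.2.1 st.2.2
  else if rowLength < 3 then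
    let p := rotatesNC st.1 st.2.1
    (p.1, p.2, st.2.2)
  else rotatesC st.1 st.2.1 st.2.2

def solution (rc : List (List Int)) (operations : List String) : List (List Int) :=
  let colLength := rc.length
  let rowLength := (rc.headD []).length      -- len(rc[0]); rc = [] raises (excluded by Pre_)
  let left := rc.map (fun row => row.headD 0)                            -- [rc[i][0] …]
  let right := rc.map (fun row => row.getLastD 0)                        -- [rc[i][-1] …]
  let center := rc.map (fun row => PySem.List.slice row (some 1) (some (-1)))
  let st := operations.foldl (stepA rowLength) (left, right, center)
  (List.range colLength).map (fun i => st.1.getD i 0 :: st.2.2.getD i [] ++ [st.2.1.getD i 0])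

-- ===== PORT B =====
-- mat = [mat[-1]] + mat[:-1]   (mat is never empty under Pre_)
def shiftRowB (mat : List (List Int)) : List (List Int) :=
  match mat.getLast? with
  | none => []
  | some last => last :: mat.dropLast

-- _rotate_ring, transliterated
def rotateRingB (mat : List (List Int)) : List (List Int) :=
  let n := mat.length
  let w := (mat.headD []).length
  if n == 1 then
    let row := mat.headD []
    if 1 < w then [row.getLastD 0 :: row.dropLast] else [row]
  else if w == 1 then
    mat.getLastD [] :: mat.dropLast
  else
    let newTop := (mat.getD 1 []).headD 0 :: PySem.List.slice (mat.headD []) none (some (-1))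
    let newBot := PySem.List.slice (mat.getLastD []) (some 1) none ++
      [(mat.getD (n - 2) []).getLastD 0]
    let newMid :=
      ((PySem.List.slice mat (some 1) (some (-1))).zip
          ((PySem.List.slice mat (some 2) none).zip (PySem.List.slice mat none (some (-2))))).map
        (fun cdu => cdu.2.1.headD 0 :: PySem.List.slice cdu.1 (some 1) (some (-1)) ++
          [cdu.2.2.getLastD 0])
    newTop :: (newMid ++ [newBot])

-- the body of B's loop over operations
def stepB (mat : List (List Int)) (op : String) : List (List Int) :=
  if op == "ShiftRow" then shiftRowB mat else rotateRingB mat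

def solution_alt (rc : List (List Int)) (operations : List String) : List (List Int) :=
  operations.foldl stepB (rc.map (fun row => row))

-- ===== PRECONDITION & SPEC =====
-- Pre_ restricts to the natural domain of the task: a non-empty rectangular matrix
-- (every row the same non-zero length). On rc = [] or an empty first row A raises
-- IndexError, and on ragged matrices A raises for some operation lists and silently
-- garbles the rows through its column deques for the others.
def Pre_solution (rc : List (List Int)) (operations : List String) : Prop :=
  rc ≠ [] ∧ (rc.headD []) ≠ [] ∧ ∀ row ∈ rc, row.length = (rc.headD []).length
instance (rc : List (List Int)) (operations : List String) : Decidable (Pre_solution rc operations) := by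
  unfold Pre_solution; infer_instance

def pvWitness_solution : List (List Int) × List String :=
  ([[1, 2], [3, 4]], ["ShiftRow", "Rotate"])

-- On matrices with a degenerate border — a single column, or a single row of width ≥ 3
-- with at least one rotate operation — A's deque shuffling returns accidental values
-- (for a single column it even doubles every row, e.g. [[5]] ↦ [[5, 5]]), while B
-- returns the intended cyclic rotation of the degenerate ring.
def D_solution (rc : List (List Int)) (operations : List String) : Prop :=
  (rc.headD []).length = 1 ∨
    (rc.length = 1 ∧ 3 ≤ (rc.headD []).length ∧ ∃ op ∈ operations, op ≠ "ShiftRow")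
instance (rc : List (List Int)) (operations : List String) : Decidable (D_solution rc operations) := by
  unfold D_solution; infer_instance

def Spec_solution (rc : List (List Int)) (operations : List String) (out : List (List Int)) : Prop :=
  ¬ D_solution rc operations → out = solution_alt rc operations
instance (rc : List (List Int)) (operations : List String) (out : List (List Int)) : Decidable (Spec_solution rc operations out) := by
  unfold Spec_solution; infer_instance

def pvDiffWitness_solution : List (List Int) × List String := ([[5]], ["Rotate"])
def pvDiffWitnessOut_solution : (List (List Int)) × (List (List Int)) := ([[5, 5]], [[5]])

-- ===== CLAIM (what is proved, stated in full; the proofs are below) =====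
def Claim_unchanged_solution : Prop := ∀ (rc : List (List Int)) (operations : List String), Dom_solution rc operations → Pre_solution rc operations → Spec_solution rc operations (solution rc operations)
def Claim_changed_solution : Prop := Dom_solution (pvDiffWitness_solution.1) (pvDiffWitness_solution.2) ∧ Pre_solution (pvDiffWitness_solution.1) (pvDiffWitness_solution.2) ∧ D_solution (pvDiffWitness_solution.1) (pvDiffWitness_solution.2) ∧ solution (pvDiffWitness_solution.1) (pvDiffWitness_solution.2) = pvDiffWitnessOut_solution.1 ∧ solution_alt (pvDiffWitness_solution.1) (pvDiffWitness_solution.2) = pvDiffWitnessOut_solution.2 ∧ pvDiffWitnessOut_solution.1 ≠ pvDiffWitnessOut_solution.2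

-- ===== LEMMAS AND PROOFS =====

-- the three column views A maintains of B's matrix
def hdI (row : List Int) : Int := row.headD 0
def lsI (row : List Int) : Int := row.getLastD 0
def inI (row : List Int) : List Int := row.tail.dropLast

theorem slice_one_negone {α : Type} (xs : List α) :
    PySem.List.slice xs (some 1) (some (-1)) = xs.tail.dropLast := by
  cases xs with
  | nil => rfl
  | cons a as =>
    simp [PySem.List.slice, PySem.List.clampIdx, List.dropLast_eq_take]
    split <;> omega

theorem slice_negtwo {α : Type} (xs : List α) :
    PySem.List.slice xs none (some (-2)) = xs.take (xs.length - 2) := by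
  simp [PySem.List.slice, PySem.List.clampIdx]
  split <;> omega

theorem slice_two {α : Type} (xs : List α) :
    PySem.List.slice xs (some 2) none = xs.drop 2 := by
  have := PySem.List.slice_from_natCast (xs := xs) (a := 2)
  simpa using this

theorem headD_eq_getElem {α : Type} (l : List α) (d : α) (h : 0 < l.length) :
    l.headD d = l[0] := by
  cases l with
  | nil => simp at h
  | cons a as => rfl

theorem getLastD_eq_getElem {α : Type} (l : List α) (d : α) (h : 0 < l.length) :
    l.getLastD d = l[l.length - 1] := by
  cases l with
  | nil => simp at h
  | cons a as =>
    rw [List.getLastD_eq_getLast?, List.getLast?_eq_some_getLast (l := a :: as) (by simp),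
      List.getLast_eq_getElem]
    rfl

theorem pyRotate1_map {α β : Type} (f : α → β) (xs : List α) :
    (pyRotate1 xs).map f = pyRotate1 (xs.map f) := by
  cases xs with
  | nil => rfl
  | cons a as =>
    rw [pyRotate1, pyRotate1,
      List.getLast?_eq_some_getLast (l := a :: as) (by simp),
      List.getLast?_eq_some_getLast (l := (a :: as).map f) (by simp)]
    simp [← List.getLast_map (f := f)]

theorem headGetD_len (w : Nat) (mat : List (List Int)) (hne : mat ≠ [])
    (hrect : ∀ row ∈ mat, row.length = w) : (mat.head?.getD []).length = w := by
  cases mat with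
  | nil => exact absurd rfl hne
  | cons a as => exact hrect a (by simp)

theorem lastGetD_len (w : Nat) (mat : List (List Int)) (hne : mat ≠ [])
    (hrect : ∀ row ∈ mat, row.length = w) : (mat.getLast?.getD []).length = w := by
  rw [List.getLast?_eq_some_getLast (l := mat) hne]
  exact hrect _ (List.getLast_mem hne)

theorem ringB_general (mat : List (List Int)) (hn : mat.length ≠ 1)
    (hw : (mat.headD []).length ≠ 1) :
    rotateRingB mat =
      ((mat.getD 1 []).headD 0 :: (mat.headD []).dropLast)
      :: ((mat.tail.dropLast.zip ((mat.drop 2).zip (mat.take (mat.length - 2)))).map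
          (fun cdu => cdu.2.1.headD 0 :: inI cdu.1 ++ [lsI cdu.2.2]))
      ++ [(mat.getLastD []).tail ++ [(mat.getD (mat.length - 2) []).getLastD 0]] := by
  rw [List.headD_eq_head?] at hw
  simp [rotateRingB, hn, hw, slice_one_negone, slice_negtwo, slice_two,
    PySem.List.slice_to_neg_one, PySem.List.slice_from_one, inI, lsI]

theorem step_shape (w : Nat) (mat : List (List Int)) (op : String)
    (hw : 2 ≤ w) (hne : mat ≠ []) (hrect : ∀ row ∈ mat, row.length = w)
    (h1 : mat.length = 1 → w = 2 ∨ op = "ShiftRow") :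
    (stepB mat op).length = mat.length ∧ ∀ row ∈ stepB mat op, row.length = w := by
  have hlen : 0 < mat.length := List.length_pos_iff.mpr hne
  by_cases hop : (op == "ShiftRow") = true
  · simp only [stepB, hop, if_pos]
    rw [shiftRowB, List.getLast?_eq_some_getLast (l := mat) hne]
    constructor
    · simp; omega
    · intro row hrow
      rcases List.mem_cons.mp hrow with h | h
      · exact h ▸ hrect _ (List.getLast_mem hne)
      · exact hrect _ (List.mem_of_mem_dropLast h)
  · simp only [stepB, hop, Bool.false_eq_true, if_neg, not_false_iff]
    have hhw : (mat.head?.getD []).length = w := headGetD_len w mat hne hrect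
    by_cases hn1 : mat.length = 1
    · obtain ⟨row, rfl⟩ : ∃ row, mat = [row] := by
        cases mat with
        | nil => simp at hlen
        | cons a as => cases as with
          | nil => exact ⟨a, rfl⟩
          | cons b bs => simp at hn1
      have hrw : row.length = w := hrect row (by simp)
      simp [rotateRingB, hrw, show (1:Nat) < w by omega]
      omega
    · rw [ringB_general mat hn1 (by rw [List.headD_eq_head?]; omega)]
      have hlast : (mat.getLast?.getD []).length = w := lastGetD_len w mat hne hrect
      constructor
      · simp; omega
      · intro row hrow
        rcases List.mem_cons.mp hrow with h | h
        · subst h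
          simp [List.headD_eq_head?]
          omega
        · rcases List.mem_append.mp h with h | h
          · obtain ⟨cdu, hcdu, rfl⟩ := List.mem_map.mp h
            have hc : cdu.1 ∈ mat :=
              List.mem_of_mem_tail (List.mem_of_mem_dropLast (List.of_mem_zip hcdu).1)
            have hclen := hrect _ hc
            simp [inI]
            omega
          · simp at h
            subst h
            simp [List.getLastD_eq_getLast?, List.headD_eq_head?]
            omega


theorem hdI_eq (row : List Int) (h : 0 < row.length) : hdI row = row[0] :=
  headD_eq_getElem row 0 h
theorem lsI_eq (row : List Int) (h : 0 < row.length) : lsI row = row[row.length - 1] :=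
  getLastD_eq_getElem row 0 h
theorem inI_len (row : List Int) : (inI row).length = row.length - 1 - 1 := by simp [inI]
theorem inI_get (row : List Int) (j : Nat) (h : j < row.length - 1 - 1) :
    (inI row)[j]'(by simp [inI]; omega) = row[j + 1]'(by omega) := by
  simp [inI, List.getElem_dropLast, List.getElem_tail]


theorem hdI_cons (a : Int) (l : List Int) : hdI (a :: l) = a := rfl
theorem getLastD_concat {α : Type} (ds : List α) (e d : α) : (ds ++ [e]).getLastD d = e := by
  rw [List.getLastD_eq_getLast?, List.getLast?_concat]; rfl
theorem hdI_cons_append (a : Int) (l l2 : List Int) : hdI ((a :: l) ++ l2) = a := rfl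
theorem lsI_concat (ds : List Int) (x : Int) : lsI (ds ++ [x]) = x := by
  rw [lsI, getLastD_concat]
theorem inI_cons_concat (a x : Int) (l : List Int) : inI ((a :: l) ++ [x]) = l := by
  simp [inI, List.dropLast_concat]

-- map over a non-empty list, splitting the last element
theorem map_last_split {α β : Type} (g : α → β) (l : List α) (h : l ≠ []) :
    l.map g = l.dropLast.map g ++ [g (l.getLast h)] := by
  conv_lhs => rw [← List.dropLast_append_getLast h]
  simp

theorem tail_map_split (g : List Int → Int) (mat : List (List Int)) (h : 2 ≤ mat.length) :
    mat.tail.map g = g (mat[1]'(by omega)) :: (mat.drop 2).map g := by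
  cases mat with
  | nil => simp at h
  | cons a l =>
    cases l with
    | nil => simp at h
    | cons b l' => rfl

theorem getLast_tail_eq (mat : List (List Int)) (h : 2 ≤ mat.length) :
    mat.tail.getLast (by rw [← List.length_pos_iff, List.length_tail]; omega) =
      mat[mat.length - 1]'(by omega) := by
  rw [List.getLast_eq_getElem, List.getElem_tail]
  congr 1
  rw [List.length_tail]
  omega

theorem dropLast_map_split (g : List Int → Int) (mat : List (List Int)) (h : 2 ≤ mat.length) :
    mat.dropLast.map g = (mat.take (mat.length - 2)).map g ++ [g (mat[mat.length - 2]'(by omega))] := by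
  have key : mat.dropLast = mat.take (mat.length - 2) ++ [mat[mat.length - 2]'(by omega)] := by
    rw [show mat.dropLast = mat.take (mat.length - 1) by simp [List.dropLast_eq_take],
      show mat.length - 1 = (mat.length - 2) + 1 by omega, List.take_add_one,
      List.getElem?_eq_getElem (by omega)]
    rfl
  rw [key, List.map_append]
  rfl

theorem set_concat_last {α : Type} (ds : List α) (e v : α) :
    (ds ++ [e]).set ds.length v = ds ++ [v] := by
  induction ds with
  | nil => rfl
  | cons a t ih => simp [ih]

-- evaluation of A's rotates-with-centre on an explicitly decomposed centre list
theorem rotatesC_eval (L R : List Int) (c0 e : List Int) (ds : List (List Int))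
    (hL : L ≠ []) (hR : R ≠ []) (hc0 : c0 ≠ []) (he : e ≠ []) :
    rotatesC L R (c0 :: (ds ++ [e])) =
      (L.tail ++ [e.headD 0],
       c0.getLastD 0 :: R.dropLast,
       (L.headD 0 :: c0.dropLast) :: (ds ++ [e.tail ++ [R.getLastD 0]])) := by
  obtain ⟨a, L', rfl⟩ : ∃ a L', L = a :: L' := by cases L with
    | nil => exact absurd rfl hL
    | cons a t => exact ⟨a, t, rfl⟩
  obtain ⟨r0, R', rfl⟩ : ∃ r0 R', R = r0 :: R' := by cases R with
    | nil => exact absurd rfl hR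
    | cons a t => exact ⟨a, t, rfl⟩
  obtain ⟨e0, e', rfl⟩ : ∃ e0 e', e = e0 :: e' := by cases e with
    | nil => exact absurd rfl he
    | cons a t => exact ⟨a, t, rfl⟩
  rw [rotatesC]
  simp only [List.headD_cons, List.length_cons, List.length_append, List.length_nil,
    List.set_cons_succ, List.set_cons_zero, Nat.add_sub_cancel, Nat.zero_add,
    getLastD_concat, set_concat_last, List.getLastD_cons, List.tail_cons, List.dropLast_cons₂,
    List.cons_append, List.nil_append]


theorem inI_cons (a : Int) (l : List Int) : inI (a :: l) = l.dropLast := rfl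

theorem map_split_head (g : List Int → List Int) (mat : List (List Int)) (h : mat ≠ []) :
    mat.map g = g (mat[0]'(List.length_pos_iff.mpr h)) :: mat.tail.map g := by
  cases mat with
  | nil => exact absurd rfl h
  | cons a l => rfl

-- both sides of a head entry: hdI (row.tail ++ [x]) = row[1]
theorem row_last_head (row : List Int) (x : Int) (h : 2 ≤ row.length) :
    hdI (row.tail ++ [x]) = row[1]'(by omega) := by
  rcases row with _ | ⟨a, _ | ⟨b, bs⟩⟩
  · simp at h
  · simp at h
  · rfl

theorem inI_eq_dropLast2_len2 (row : List Int) (h : row.length = 2) :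
    inI row = row.dropLast.dropLast := by
  rcases row with _ | ⟨a, _ | ⟨b, _ | ⟨c, t⟩⟩⟩ <;> simp_all [inI]

theorem row0_w3 (row : List Int) (h : 3 ≤ row.length) :
    (row[0]'(by omega)) :: (inI row).dropLast = row.dropLast.dropLast := by
  rcases row with _ | ⟨a, rest⟩
  · simp at h
  · have h1 : rest ≠ [] := by intro hh; subst hh; simp at h
    have h2 : rest.dropLast ≠ [] := by
      rw [← List.length_pos_iff, List.length_dropLast]
      simp at h; omega
    simp [inI, List.dropLast_cons_of_ne_nil h1, List.dropLast_cons_of_ne_nil h2]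

theorem inI_concat_tail (row : List Int) (x : Int) :
    inI (row.tail ++ [x]) = row.tail.tail := by
  rcases row with _ | ⟨a, _ | ⟨b, bs⟩⟩ <;> simp [inI, List.dropLast_concat]

theorem r4_lem (row : List Int) (h : 3 ≤ row.length) :
    (inI row).tail ++ [lsI row] = row.tail.tail := by
  rcases row with _ | ⟨a, _ | ⟨b, rest⟩⟩
  · simp at h
  · simp at h
  · have hr : rest ≠ [] := by intro hh; subst hh; simp at h
    have hbl : (b :: rest).getLast? = some (rest.getLast hr) := by
      rw [List.getLast?_eq_some_getLast (l := b :: rest) (by simp)]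
      exact congrArg some (List.getLast_cons hr)
    simp [inI, lsI, List.dropLast_cons_of_ne_nil hr, List.getLastD_cons,
      List.getLastD_eq_getLast?, hbl, List.dropLast_append_getLast]

theorem zipA_hd (mat : List (List Int)) :
    ((mat.tail.dropLast.zip ((mat.drop 2).zip (mat.take (mat.length - 2)))).map
      (fun cdu => cdu.2.1.headD 0)) = (mat.drop 2).map hdI := by
  apply List.ext_getElem
  · simp; omega
  · intro i ha hb
    simp [List.getElem_zip, hdI]

theorem zipA_ls (mat : List (List Int)) :
    ((mat.tail.dropLast.zip ((mat.drop 2).zip (mat.take (mat.length - 2)))).map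
      (fun cdu => lsI cdu.2.2)) = (mat.take (mat.length - 2)).map lsI := by
  apply List.ext_getElem
  · simp; omega
  · intro i ha hb
    simp [List.getElem_zip]

theorem zipA_in (mat : List (List Int)) :
    ((mat.tail.dropLast.zip ((mat.drop 2).zip (mat.take (mat.length - 2)))).map
      (fun cdu => inI cdu.1)) = (mat.tail.dropLast).map inI := by
  apply List.ext_getElem
  · simp; omega
  · intro i ha hb
    simp [List.getElem_zip]

theorem rotatesNC_eval (L R : List Int) (hL : L ≠ []) (hR : R ≠ []) :
    rotatesNC L R = (L.tail ++ [R.getLastD 0], L.headD 0 :: R.dropLast) := by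
  obtain ⟨a, L', rfl⟩ : ∃ a L', L = a :: L' := by cases L with
    | nil => exact absurd rfl hL
    | cons a t => exact ⟨a, t, rfl⟩
  obtain ⟨r0, R', rfl⟩ : ∃ r0 R', R = r0 :: R' := by cases R with
    | nil => exact absurd rfl hR
    | cons a t => exact ⟨a, t, rfl⟩
  rw [rotatesNC]
  simp only [List.headD_cons, List.getLastD_cons, List.dropLast_cons₂]

theorem getElem_idx_congr {α : Type} (l : List α) (i j : Nat) (h : i = j) (hi : j < l.length) :
    l[i]'(h ▸ hi) = l[j] := by
  subst h; rfl

theorem len2_inI_tt (row : List Int) (h : row.length = 2) : inI row = row.tail.tail := by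
  rcases row with _ | ⟨a, _ | ⟨b, _ | ⟨c, t⟩⟩⟩ <;> simp_all [inI]

theorem step_comm (w : Nat) (mat : List (List Int)) (op : String)
    (hw : 2 ≤ w) (hne : mat ≠ []) (hrect : ∀ row ∈ mat, row.length = w)
    (h1 : mat.length = 1 → w = 2 ∨ op = "ShiftRow") :
    stepA w (mat.map hdI, mat.map lsI, mat.map inI) op =
      ((stepB mat op).map hdI, (stepB mat op).map lsI, (stepB mat op).map inI) := by
  have hlen : 0 < mat.length := List.length_pos_iff.mpr hne
  by_cases hop : (op == "ShiftRow") = true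
  · have hB : stepB mat op = pyRotate1 mat := by
      cases mat with
      | nil => exact absurd rfl hne
      | cons a as =>
        simp [stepB, hop, shiftRowB, pyRotate1,
          List.getLast?_eq_some_getLast (l := a :: as) (by simp)]
    rw [hB]
    simp [stepA, hop, shiftRowsA, pyRotate1_map]
  · have hops : op ≠ "ShiftRow" := by simpa using hop
    by_cases hn1 : mat.length = 1
    · have hw2 : w = 2 := (h1 hn1).resolve_right hops
      obtain ⟨row, rfl⟩ : ∃ row, mat = [row] := by
        cases mat with
        | nil => simp at hlen
        | cons a as => cases as with
          | nil => exact ⟨a, rfl⟩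
          | cons b bs => simp at hn1
      obtain ⟨a, b, rfl⟩ : ∃ a b, row = [a, b] := by
        have := hrect row (by simp)
        rw [hw2] at this
        rcases row with _ | ⟨a, _ | ⟨b, _ | ⟨c, t⟩⟩⟩ <;> simp_all
      subst hw2
      simp [stepA, stepB, hop, rotatesNC, rotateRingB, hdI, lsI, inI]
    · -- n >= 2
      have hn2 : 2 ≤ mat.length := by omega
      have hrow : ∀ (i : Nat) (h : i < mat.length), (mat[i]'h).length = w :=
        fun i h => hrect _ (List.getElem_mem h)
      have hw0 : (mat.headD []).length = w := by
        rw [headD_eq_getElem _ _ hlen]; exact hrow 0 hlen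
      have hBrw : stepB mat op = rotateRingB mat := by simp [stepB, hop]
      rw [hBrw, ringB_general mat hn1 (by omega)]
      have htne : mat.tail ≠ [] := by
        rw [← List.length_pos_iff, List.length_tail]; omega
      have hLne : mat.map hdI ≠ [] := by simpa using hne
      have hRne : mat.map lsI ≠ [] := by simpa using hne
      have e1 : mat.getD 1 [] = mat[1]'(by omega) := by
        rw [List.getD_eq_getElem?_getD, List.getElem?_eq_getElem (by omega)]; rfl
      have e2 : mat.headD [] = mat[0]'hlen := headD_eq_getElem _ _ hlen
      have e3 : mat.getLastD [] = mat[mat.length - 1]'(by omega) := getLastD_eq_getElem _ _ hlen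
      have e4 : mat.getD (mat.length - 2) [] = mat[mat.length - 2]'(by omega) := by
        rw [List.getD_eq_getElem?_getD, List.getElem?_eq_getElem (by omega)]; rfl
      rw [stepA]
      simp only [hop, Bool.false_eq_true, if_neg, not_false_iff, e1, e2, e3, e4,
        List.map_cons, List.map_append, List.map_map, Function.comp_def,
        hdI_cons, hdI_cons_append, lsI_concat, inI_cons_concat, inI_cons, List.map_nil,
        zipA_hd, zipA_ls, zipA_in]
      -- common row-level facts
      have hL0 : (mat.map hdI).headD 0 = hdI (mat[0]'hlen) := by
        rw [headD_eq_getElem _ _ (by simpa using hlen)]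
        simp
      have hLt : (mat.map hdI).tail = hdI (mat[1]'(by omega)) :: (mat.drop 2).map hdI := by
        rw [← List.map_tail, tail_map_split hdI mat hn2]
      have hRd : (mat.map lsI).dropLast =
          (mat.take (mat.length - 2)).map lsI ++ [lsI (mat[mat.length - 2]'(by omega))] := by
        rw [← List.map_dropLast, dropLast_map_split lsI mat hn2]
      have hRlast : (mat.map lsI).getLastD 0 = lsI (mat[mat.length - 1]'(by omega)) := by
        rw [getLastD_eq_getElem _ _ (by simpa using hlen)]
        simp
      have hClast : hdI ((mat[mat.length - 1]'(by omega)).tail ++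
          [(mat[mat.length - 2]'(by omega)).getLastD 0]) = (mat[mat.length - 1]'(by omega))[1]'(by rw [hrow]; omega) :=
        row_last_head _ _ (by rw [hrow]; omega)
      by_cases hw3 : w < 3
      · -- row_length = 2
        have hw2 : w = 2 := by omega
        rw [if_pos hw3, rotatesNC_eval _ _ hLne hRne]
        simp only [Prod.mk.injEq]
        refine ⟨?_, ?_, ?_⟩
        · rw [hLt, hRlast, hClast]
          have hlsI1 : lsI (mat[mat.length - 1]'(by omega)) =
              (mat[mat.length - 1]'(by omega))[1]'(by rw [hrow]; omega) := by
            rw [lsI_eq _ (by rw [hrow]; omega)]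
            exact getElem_idx_congr _ _ _ (by rw [hrow]; omega) _
          rw [hlsI1]
          simp [hdI, List.cons_append]
        · rw [hL0, hRd, hdI_eq _ (by rw [hrow]; omega)]
          have : lsI ((mat[1]'(by omega)).headD 0 :: (mat[0]'hlen).dropLast) =
              (mat[0]'hlen)[0]'(by rw [hrow]; omega) := by
            rw [lsI, List.getLastD_cons,
              getLastD_eq_getElem _ _ (by rw [List.length_dropLast, hrow]; omega),
              List.getElem_dropLast]
            congr 1
            rw [List.length_dropLast, hrow]; omega
          rw [this]
          simp [lsI, List.cons_append]
        · rw [map_split_head inI mat hne, map_last_split inI mat.tail htne,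
            getLast_tail_eq mat hn2,
            inI_eq_dropLast2_len2 _ (by rw [hrow]; omega), inI_concat_tail,
            len2_inI_tt _ (by rw [hrow]; omega)]
          simp [List.cons_append]
      · -- row_length >= 3
        have hw3' : 3 ≤ w := by omega
        have hCdec : mat.map inI = inI (mat[0]'hlen) ::
            ((mat.tail.dropLast).map inI ++ [inI (mat[mat.length - 1]'(by omega))]) := by
          rw [map_split_head inI mat hne]
          congr 1
          rw [map_last_split inI mat.tail htne, getLast_tail_eq mat hn2]
        have hc0ne : inI (mat[0]'hlen) ≠ [] := by
          rw [← List.length_pos_iff, inI_len, hrow]; omega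
        have hene : inI (mat[mat.length - 1]'(by omega)) ≠ [] := by
          rw [← List.length_pos_iff, inI_len, hrow]; omega
        rw [if_neg hw3, hCdec, rotatesC_eval _ _ _ _ _ hLne hRne hc0ne hene]
        simp only [Prod.mk.injEq]
        refine ⟨?_, ?_, ?_⟩
        · rw [hLt, hClast]
          have : (inI (mat[mat.length - 1]'(by omega))).headD 0 =
              (mat[mat.length - 1]'(by omega))[1]'(by rw [hrow]; omega) := by
            rw [headD_eq_getElem _ _ (by rw [inI_len, hrow]; omega), inI_get _ _ (by rw [hrow]; omega)]
          rw [this]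
          simp [hdI, List.cons_append]
        · rw [hRd]
          have h1 : (inI (mat[0]'hlen)).getLastD 0 =
              (mat[0]'hlen)[w - 2]'(by rw [hrow]; omega) := by
            rw [getLastD_eq_getElem _ _ (by rw [inI_len, hrow]; omega),
              inI_get _ _ (by rw [inI_len, hrow] at *; omega)]
            congr 1
            rw [inI_len, hrow]; omega
          have h2 : lsI ((mat[1]'(by omega)).headD 0 :: (mat[0]'hlen).dropLast) =
              (mat[0]'hlen)[w - 2]'(by rw [hrow]; omega) := by
            rw [lsI, List.getLastD_cons,
              getLastD_eq_getElem _ _ (by rw [List.length_dropLast, hrow]; omega),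
              List.getElem_dropLast]
            congr 1
            rw [List.length_dropLast, hrow]; omega
          rw [h1, h2]
          simp [lsI, List.cons_append]
        · rw [inI_concat_tail, hL0, hdI_eq _ (by rw [hrow]; omega), hRlast,
            r4_lem _ (by rw [hrow]; omega), row0_w3 _ (by rw [hrow]; omega)]
          simp [List.cons_append]


theorem fold_comm (w : Nat) (ops : List String) : ∀ (mat : List (List Int)),
    2 ≤ w → mat ≠ [] → (∀ row ∈ mat, row.length = w) →
    (∀ op ∈ ops, mat.length = 1 → w = 2 ∨ op = "ShiftRow") →
    ops.foldl (stepA w) (mat.map hdI, mat.map lsI, mat.map inI) =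
        ((ops.foldl stepB mat).map hdI, (ops.foldl stepB mat).map lsI,
          (ops.foldl stepB mat).map inI) ∧
      (ops.foldl stepB mat).length = mat.length ∧
      (∀ row ∈ ops.foldl stepB mat, row.length = w) := by
  induction ops with
  | nil => intro mat hw hne hrect hops; exact ⟨rfl, rfl, hrect⟩
  | cons op rest ih =>
    intro mat hw hne hrect hops
    have h1 : mat.length = 1 → w = 2 ∨ op = "ShiftRow" := hops op (by simp)
    have hsh := step_shape w mat op hw hne hrect h1
    have hcomm := step_comm w mat op hw hne hrect h1
    have hne' : stepB mat op ≠ [] := by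
      rw [← List.length_pos_iff, hsh.1]
      exact List.length_pos_iff.mpr hne
    have hops' : ∀ o ∈ rest, (stepB mat op).length = 1 → w = 2 ∨ o = "ShiftRow" := by
      intro o ho hlen1
      exact hops o (by simp [ho]) (by omega)
    obtain ⟨ihc, ihl, ihr⟩ := ih (stepB mat op) hw hne' hsh.2 hops'
    refine ⟨?_, by simpa [List.foldl_cons] using ihl.trans hsh.1, by simpa using ihr⟩
    simp only [List.foldl_cons, hcomm, ihc]

theorem row_rebuild (row : List Int) (h : 2 ≤ row.length) :
    (hdI row :: inI row) ++ [lsI row] = row := by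
  rcases row with _ | ⟨a, rest⟩
  · simp at h
  · have hr : rest ≠ [] := by intro hh; subst hh; simp at h
    have hbl : (a :: rest).getLast? = some (rest.getLast hr) := by
      rw [List.getLast?_eq_some_getLast (l := a :: rest) (by simp)]
      exact congrArg some (List.getLast_cons hr)
    simp [hdI, inI, lsI, List.getLastD_eq_getLast?, hbl, List.dropLast_append_getLast]

theorem decode_encode (w : Nat) (mat : List (List Int)) (hw : 2 ≤ w)
    (hrect : ∀ row ∈ mat, row.length = w) :
    (List.range mat.length).map (fun i =>
      (mat.map hdI).getD i 0 :: (mat.map inI).getD i [] ++ [(mat.map lsI).getD i 0]) = mat := by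
  apply List.ext_getElem
  · simp
  · intro i h1 h2
    have hi : i < mat.length := by simpa using h1
    have g1 : (mat.map hdI).getD i 0 = hdI (mat[i]'hi) := by
      rw [List.getD_eq_getElem?_getD, List.getElem?_map, List.getElem?_eq_getElem hi]
      rfl
    have g2 : (mat.map inI).getD i [] = inI (mat[i]'hi) := by
      rw [List.getD_eq_getElem?_getD, List.getElem?_map, List.getElem?_eq_getElem hi]
      rfl
    have g3 : (mat.map lsI).getD i 0 = lsI (mat[i]'hi) := by
      rw [List.getD_eq_getElem?_getD, List.getElem?_map, List.getElem?_eq_getElem hi]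
      rfl
    simp only [List.getElem_map, List.getElem_range, g1, g2, g3]
    exact row_rebuild _ (by rw [hrect _ (List.getElem_mem hi)]; omega)

theorem main_eq (rc : List (List Int)) (ops : List String)
    (hpre : Pre_solution rc ops) (hnd : ¬ D_solution rc ops) :
    solution rc ops = solution_alt rc ops := by
  obtain ⟨hne, hh, hrect⟩ := hpre
  have hw0 : 0 < (rc.headD []).length := List.length_pos_iff.mpr hh
  have hwne1 : (rc.headD []).length ≠ 1 := fun h => hnd (Or.inl h)
  have hw2 : 2 ≤ (rc.headD []).length := by omega
  have hops : ∀ op ∈ ops, rc.length = 1 → (rc.headD []).length = 2 ∨ op = "ShiftRow" := by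
    intro op hop hn1
    by_cases hw3 : (rc.headD []).length < 3
    · left; omega
    · right
      by_contra hne'
      exact hnd (Or.inr ⟨hn1, by omega, op, hop, hne'⟩)
  obtain ⟨hc, hl, hr⟩ := fold_comm (rc.headD []).length ops rc hw2 hne hrect hops
  have g1 : (fun (row : List Int) => row.headD 0) = hdI := rfl
  have g2 : (fun (row : List Int) => row.getLastD 0) = lsI := rfl
  have g3 : (fun (row : List Int) => PySem.List.slice row (some 1) (some (-1))) = inI := by
    funext row; rw [slice_one_negone]; rfl
  have hmapid : rc.map (fun row => row) = rc := by simp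
  simp only [solution, solution_alt, hmapid, g1, g2, g3, hc]
  rw [show rc.length = (ops.foldl stepB rc).length from hl.symm]
  exact decode_encode _ _ hw2 hr

-- ===== VERDICT (by name: the statement is the Claim_ definition above) =====
theorem solution_spec : Claim_unchanged_solution := by
  intro rc operations _hdom hpre hnd
  exact main_eq rc operations hpre hnd

theorem solution_changed : Claim_changed_solution := by
  unfold Claim_changed_solution; decide
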